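-- pv_equiv track=rewrite | github.com/rupalisinha23/python_interviews | lexicographically_smallest_string.py | solution
-- ===== SOURCE A (Python) =====
-- def solution(S):
--     l = len(S)
--     ans = ""
--     # iterate through string
--     for i in range (l-1):
--         # first point where s[i]>s[i+1]
--         if (S[i] > S[i + 1]):
--             # form the string without the last char
--             for j in range (l):
--                 if (i != j):
--                     ans += S[j]
--             return ans
--     # remove the last char
--     ans = S[0:l - 1]
--     return ans
-- ===== SOURCE B (Python) =====
-- def solution(S):
--     return min((S[:i] + S[i+1:] for i in range(len(S))), default="")
-- ===== Notes on version B (the rewrite author's own statement) =====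
-- stated objective: simpler
-- what changed: A's greedy first-descent scan (find the first i with S[i]>S[i+1], rebuild the string without it, else drop the last char) is replaced by a one-line enumerate-and-minimize: B forms every string obtained by deleting exactly one character and returns their lexicographic minimum (default '' for the empty string).
import Mathlib
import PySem

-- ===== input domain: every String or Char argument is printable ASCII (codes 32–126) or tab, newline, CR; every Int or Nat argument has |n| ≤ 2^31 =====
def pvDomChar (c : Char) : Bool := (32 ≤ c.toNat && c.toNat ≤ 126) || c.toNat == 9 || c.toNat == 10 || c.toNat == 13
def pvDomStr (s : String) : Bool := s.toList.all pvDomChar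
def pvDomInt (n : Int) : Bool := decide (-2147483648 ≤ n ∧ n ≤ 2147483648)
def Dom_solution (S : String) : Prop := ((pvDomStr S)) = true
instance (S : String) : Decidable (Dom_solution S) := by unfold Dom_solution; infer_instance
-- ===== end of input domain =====

-- B replaces A's greedy first-descent scan by enumerate-all-single-deletions-and-take-the-minimum (simpler, not faster).

-- ===== PORT A =====
-- inner loop: "for j in range(l): if i != j: ans += S[j]"  (j is always in range there, so pyGetD is exact)
def solutionInner (s : List Char) (i : Int) : List Char :=
  (PySem.List.pyRange 0 (s.length : Int) 1).foldl
    (fun ans j => if i ≠ j then ans ++ [PySem.List.pyGetD s j ' '] else ans) []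

-- outer loop: "for i in range(l-1): if S[i] > S[i+1]: return <inner>", falling through to "return S[0:l-1]"
def solutionLoop (s : List Char) : List Int → List Char
  | [] => PySem.List.slice s (some 0) (some ((s.length : Int) - 1))
  | i :: rest =>
    if PySem.List.pyGetD s i ' ' > PySem.List.pyGetD s (i + 1) ' ' then
      solutionInner s i
    else solutionLoop s rest

def solution (S : String) : String :=
  String.ofList (solutionLoop S.toList (PySem.List.pyRange 0 ((S.toList.length : Int) - 1) 1))

-- ===== PORT B =====
-- the lexicographic order on List Char (= Python's '<' on str), pinned so that Python's min is unambiguous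
abbrev pvLinOrd : LinearOrder (List Char) := inferInstance
abbrev pvLTL : LT (List Char) := @Preorder.toLT _ (@PartialOrder.toPreorder _ (@LinearOrder.toPartialOrder _ pvLinOrd))
abbrev pvDecLTL : DecidableLT (List Char) := @LinearOrder.toDecidableLT _ pvLinOrd

-- Source B: min((S[:i] + S[i+1:] for i in range(len(S))), default="") — slices/concat/min on code-point lists
def solution_alt (S : String) : String :=
  String.ofList (@PySem.List.minD (List Char) (List Char) pvLTL pvDecLTL
    ((PySem.List.pyRange 0 (S.toList.length : Int) 1).map
      (fun i => PySem.List.slice S.toList none (some i) ++ PySem.List.slice S.toList (some (i + 1)) none))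
    (fun x => x) [])

-- ===== PRECONDITION & SPEC =====
def Spec_solution (S : String) (out : String) : Prop := out = solution_alt S
instance (S : String) (out : String) : Decidable (Spec_solution S out) := by unfold Spec_solution; infer_instance

-- ===== CLAIM (what is proved, stated in full; the proofs are below) =====
def Claim_equal_solution : Prop := ∀ (S : String), Dom_solution S → Spec_solution S (solution S)

-- ===== LEMMAS AND PROOFS =====

-- the common value: remove the character at the first descent, else the last character
def fGreedy : List Char → List Char
  | [] => []
  | [_] => []
  | a :: b :: t => if b < a then b :: t else a :: fGreedy (b :: t)

theorem fGreedy_short (s : List Char) (h : s.length ≤ 1) : fGreedy s = [] := by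
  match s, h with
  | [], _ => rfl
  | [_], _ => rfl

theorem nil_le_list (l : List Char) : [] ≤ l := by
  cases l with
  | nil => exact le_refl _
  | cons a t => exact le_of_lt List.Lex.nil

theorem cons_le_cons_list (a : Char) {l m : List Char} (h : l ≤ m) : a :: l ≤ a :: m := by
  rcases lt_or_eq_of_le h with h' | h'
  · exact le_of_lt (List.Lex.cons h')
  · exact le_of_eq (by rw [h'])

-- fGreedy is ≤ every single-character deletion
theorem fGreedy_min : ∀ (s : List Char) (i : Nat), i < s.length →
    fGreedy s ≤ s.take i ++ s.drop (i + 1) := by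
  intro s
  induction s with
  | nil => intro i hi; simp at hi
  | cons a r ih =>
    intro i hi
    cases r with
    | nil =>
      have h0 : i = 0 := by simp at hi; omega
      subst h0
      rw [show fGreedy [a] = [] from rfl]
      exact nil_le_list _
    | cons b t =>
      rw [fGreedy]
      cases i with
      | zero =>
        simp only [List.take_zero, List.drop_succ_cons, List.drop_zero, List.nil_append]
        split_ifs with hba
        · exact le_refl _
        · rcases lt_or_eq_of_le (not_lt.mp hba) with hab | hab
          · exact le_of_lt (List.Lex.rel hab)
          · subst hab
            have h0 : fGreedy (a :: t) ≤ (a :: t).take 0 ++ (a :: t).drop 1 := ih 0 (by simp)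
            simpa using cons_le_cons_list a h0
      | succ j =>
        have hj : j < (b :: t).length := by simp at hi ⊢; omega
        simp only [List.take_succ_cons, List.drop_succ_cons, List.cons_append]
        split_ifs with hba
        · exact le_of_lt (List.Lex.rel hba)
        · exact cons_le_cons_list a (ih j hj)

-- fGreedy is itself a single-character deletion
theorem fGreedy_mem : ∀ (s : List Char), s ≠ [] →
    ∃ i, i < s.length ∧ fGreedy s = s.take i ++ s.drop (i + 1) := by
  intro s
  induction s with
  | nil => intro h; exact absurd rfl h
  | cons a r ih =>
    intro _
    cases r with
    | nil => exact ⟨0, by simp, by simp [fGreedy]⟩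
    | cons b t =>
      rw [fGreedy]
      by_cases hba : b < a
      · exact ⟨0, by simp, by simp [hba]⟩
      · obtain ⟨i, hi, heq⟩ := ih (by simp)
        refine ⟨i + 1, by simp at hi ⊢; omega, ?_⟩
        simp [hba, heq]

-- Python's min over a list containing a global minimum returns exactly that value
theorem minD_eq_of_min (xs : List (List Char)) (m : List Char) (hm : m ∈ xs)
    (hmin : ∀ c ∈ xs, m ≤ c) :
    @PySem.List.minD (List Char) (List Char) pvLTL pvDecLTL xs (fun x => x) [] = m := by
  cases h : @PySem.List.min? (List Char) (List Char) pvLTL pvDecLTL xs (fun x => x) with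
  | none =>
    rw [@PySem.List.min?_eq_none_iff (List Char) (List Char) pvLTL pvDecLTL xs (fun x => x)] at h
    subst h; simp at hm
  | some x =>
    have h1 : x ∈ xs := @PySem.List.min?_mem (List Char) (List Char) pvLTL pvDecLTL _ _ _ h
    have h2 : x ≤ m := by simpa using PySem.List.min?_isMin h m hm
    have hxm : x = m := le_antisymm h2 (hmin x h1)
    simp [PySem.List.minD, h, hxm]

-- A-side: the inner rebuild loop produces the deletion at index i
theorem inner_eq (s : List Char) (i : Nat) (hi : i < s.length) :
    solutionInner s (i : Int) = s.take i ++ s.drop (i + 1) := by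
  unfold solutionInner
  rw [PySem.List.foldl_append_ite (fun j => (i : Int) ≠ j) (fun j => PySem.List.pyGetD s j ' ')]
  rw [PySem.List.pyRange_one_append 0 (i : Int) (s.length : Int) (by omega) (by omega)]
  rw [PySem.List.pyRange_one_cons (by omega : (i : Int) < (s.length : Int))]
  rw [List.filter_append]
  have hpre : (PySem.List.pyRange 0 (i : Int) 1).filter (fun j => decide ((i : Int) ≠ j))
      = PySem.List.pyRange 0 (i : Int) 1 := by
    apply List.filter_eq_self.mpr
    intro j hj
    have := (PySem.List.mem_pyRange_one).mp hj
    simp only [decide_eq_true_eq]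
    omega
  have hskip : ((i : Int) :: PySem.List.pyRange ((i : Int) + 1) (s.length : Int) 1).filter
      (fun j => decide ((i : Int) ≠ j))
      = (PySem.List.pyRange ((i : Int) + 1) (s.length : Int) 1).filter
        (fun j => decide ((i : Int) ≠ j)) := by
    rw [List.filter_cons]
    simp
  have hrest : (PySem.List.pyRange ((i : Int) + 1) (s.length : Int) 1).filter
      (fun j => decide ((i : Int) ≠ j))
      = PySem.List.pyRange ((i : Int) + 1) (s.length : Int) 1 := by
    apply List.filter_eq_self.mpr
    intro j hj
    have := (PySem.List.mem_pyRange_one).mp hj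
    simp only [decide_eq_true_eq]
    omega
  rw [hpre, hskip, hrest, List.map_append, List.nil_append]
  have hdrop : (PySem.List.pyRange ((i : Int) + 1) (s.length : Int) 1).map
      (fun j => PySem.List.pyGetD s j ' ') = s.drop (i + 1) := by
    have h := PySem.List.map_pyGetD_pyRange' s ' ' (a := (i : Int) + 1) (by omega)
    have ht : ((i : Int) + 1).toNat = i + 1 := by omega
    rw [h, ht]
  have htake : (PySem.List.pyRange 0 (i : Int) 1).map
      (fun j => PySem.List.pyGetD s j ' ') = s.take i := by
    apply List.ext_getElem
    · simp [PySem.List.length_pyRange_one]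
      omega
    · intro k h1 h2
      have hk : k < i := by
        simp [PySem.List.length_pyRange_one] at h1
        omega
      rw [List.getElem_map, PySem.List.getElem_pyRange_one, List.getElem_take]
      rw [PySem.List.pyGetD_eq_getElem s ' ' (by omega) (by omega)]
      congr 1
      omega
  rw [hdrop, htake]

-- A-side: loop invariant for the outer scan, by induction on the remaining range
theorem loop_eq : ∀ (n : Nat) (s : List Char) (k : Nat), s.length - 1 - k = n → k ≤ s.length - 1 →
    solutionLoop s (PySem.List.pyRange (k : Int) ((s.length : Int) - 1) 1)
      = s.take k ++ fGreedy (s.drop k) := by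
  intro n
  induction n with
  | zero =>
    intro s k hn hk
    rw [PySem.List.pyRange_one_eq_nil (by omega)]
    simp only [solutionLoop]
    rw [fGreedy_short (s.drop k) (by rw [List.length_drop]; omega), List.append_nil]
    by_cases hs0 : s.length = 0
    · have hs : s = [] := List.length_eq_zero_iff.mp hs0
      subst hs
      have hk0 : k = 0 := by omega
      subst hk0
      decide
    · have hc : ((s.length : Int) - 1) = ((s.length - 1 : Nat) : Int) := by omega
      rw [hc, PySem.List.slice_zero_start, PySem.List.slice_to_natCast]
      have hk' : k = s.length - 1 := by omega
      rw [hk']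
  | succ n ihn =>
    intro s k hn hk
    have hk1 : k + 1 < s.length := by omega
    have hkl : k < s.length := by omega
    rw [PySem.List.pyRange_one_cons (by omega : (k : Int) < (s.length : Int) - 1)]
    simp only [solutionLoop]
    rw [PySem.List.pyGetD_eq_getElem s ' ' (i := (k : Int)) (by omega) (by omega)]
    rw [show ((k : Int) + 1) = ((k + 1 : Nat) : Int) by push_cast; ring]
    rw [PySem.List.pyGetD_eq_getElem s ' ' (i := ((k + 1 : Nat) : Int)) (by omega) (by push_cast; omega)]
    simp only [Int.toNat_natCast]
    have hdropk : s.drop k = s[k] :: s[k + 1] :: s.drop (k + 2) := by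
      rw [List.drop_eq_getElem_cons hkl, List.drop_eq_getElem_cons hk1]
    rw [hdropk, fGreedy]
    simp only [gt_iff_lt]
    split_ifs with hba
    · rw [inner_eq s k hkl, List.drop_eq_getElem_cons hk1]
    · rw [ihn s (k + 1) (by omega) (by omega)]
      rw [List.drop_eq_getElem_cons hk1]
      have ht : s.take (k + 1) = s.take k ++ [s[k]] := by
        rw [List.take_add_one, List.getElem?_eq_getElem hkl]
        rfl
      rw [ht, List.append_assoc, List.singleton_append]

-- A computes fGreedy
theorem solution_eq_fGreedy (S : String) : solution S = String.ofList (fGreedy S.toList) := by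
  unfold solution
  have h := loop_eq (S.toList.length - 1) S.toList 0 (by omega) (by omega)
  simpa using congrArg String.ofList h

-- B-side: the candidate list of the port is the list of all single-character deletions
theorem cands_eq (s : List Char) :
    (PySem.List.pyRange 0 (s.length : Int) 1).map
      (fun i => PySem.List.slice s none (some i) ++ PySem.List.slice s (some (i + 1)) none)
      = (List.range s.length).map (fun i => s.take i ++ s.drop (i + 1)) := by
  rw [PySem.List.pyRange_zero_nat, List.map_map]
  apply List.map_congr_left
  intro k _
  simp only [Function.comp_apply]
  rw [PySem.List.slice_to_natCast]
  rw [show ((k : Int) + 1) = ((k + 1 : Nat) : Int) by push_cast; ring]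
  rw [PySem.List.slice_from s (by omega)]
  simp

-- B computes fGreedy
theorem solution_alt_eq_fGreedy (S : String) :
    solution_alt S = String.ofList (fGreedy S.toList) := by
  unfold solution_alt
  rw [cands_eq S.toList]
  congr 1
  cases hs : S.toList with
  | nil => rfl
  | cons a r =>
    rw [← hs]
    have hne : S.toList ≠ [] := by rw [hs]; exact List.cons_ne_nil a r
    obtain ⟨i, hi, heq⟩ := fGreedy_mem S.toList hne
    apply minD_eq_of_min
    · rw [heq]
      exact List.mem_map.mpr ⟨i, List.mem_range.mpr hi, rfl⟩
    · intro c hc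
      obtain ⟨j, hjm, rfl⟩ := List.mem_map.mp hc
      exact fGreedy_min S.toList j (List.mem_range.mp hjm)

-- ===== VERDICT (by name: the statement is the Claim_ definition above) =====
theorem solution_spec : Claim_equal_solution := by
  intro S _
  unfold Spec_solution
  rw [solution_eq_fGreedy, solution_alt_eq_fGreedy]
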